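-- pv_equiv track=rewrite | github.com/barnrang/Pro-con | Atcoder/DISCO-2020/D.py | count_reduce
-- ===== SOURCE A (Python) =====
-- def count_reduce(x, n):
--     count = 0
--
--     if n == 1:
--         return 0, x
--
--     num, left = count_reduce(x, n//2)
--     count += 2*num
--     if left >= 5:
--         count += 2
--         left = (2 * left) % 9
--     else:
--         count += 1
--         left = 2 * left
--
--     # Pluse the left over
--     if n & 1 == 1:
--         if left + x > 9:
--             count += 2
--             left = (left + x) % 9
--         else:
--             left = left + x
--             count += 1
--     return count, left
-- ===== SOURCE B (Python) =====
-- def count_reduce(x, n):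
--     # iterative bit-loop over n's binary digits (MSB first) instead of halving recursion
--     bits = bin(n)[2:]
--     count, left = 0, x
--     for b in bits[1:]:
--         if left >= 5:
--             count, left = 2 * count + 2, (2 * left) % 9
--         else:
--             count, left = 2 * count + 1, 2 * left
--         if b == '1':
--             if left + x > 9:
--                 count, left = count + 2, (left + x) % 9
--             else:
--                 count, left = count + 1, left + x
--     return count, left
-- ===== Notes on version B (the rewrite author's own statement) =====
-- stated objective: alternative
-- what changed: Replaced the halving recursion over n with a single explicit loop over n's binary digits (MSB first), seeding from the leading bit and applying the doubling step then the conditional carry step per remaining bit.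
import Mathlib
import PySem

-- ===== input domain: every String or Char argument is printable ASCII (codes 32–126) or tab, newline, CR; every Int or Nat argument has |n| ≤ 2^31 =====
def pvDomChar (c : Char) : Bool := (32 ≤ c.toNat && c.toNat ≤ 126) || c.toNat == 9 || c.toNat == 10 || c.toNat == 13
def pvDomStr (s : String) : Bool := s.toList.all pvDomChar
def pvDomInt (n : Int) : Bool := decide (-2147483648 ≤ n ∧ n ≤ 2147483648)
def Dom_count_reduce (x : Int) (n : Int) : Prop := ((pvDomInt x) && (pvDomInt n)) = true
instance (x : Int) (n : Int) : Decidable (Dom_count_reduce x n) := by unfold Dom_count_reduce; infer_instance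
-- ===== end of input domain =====

-- B replaces A's halving recursion by one explicit loop over n's binary digits (MSB first): same arithmetic, different decomposition (objective: alternative).

-- ===== PORT A =====
-- A recurses on n//2; for n ≥ 1 this is recursion on n.toNat, so the port is a Nat-measure
-- recursion (the `m ≤ 1` test is A's `n == 1` plus a totalization guard for the n ≤ 0 inputs,
-- on which Python A raises RecursionError and which Pre_ excludes).
def countA (x : Int) (m : Nat) : Int × Int :=
  if m ≤ 1 then (0, x)
  else
    let p := countA x (m / 2)
    let num := p.1
    let left0 := p.2
    let c1 : Int := 2 * num
    let s1 : Int × Int :=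
      if left0 ≥ 5 then (c1 + 2, PySem.Int.mod (2 * left0) 9) else (c1 + 1, 2 * left0)
    if m % 2 == 1 then
      if s1.2 + x > 9 then (s1.1 + 2, PySem.Int.mod (s1.2 + x) 9) else (s1.1 + 1, s1.2 + x)
    else s1
decreasing_by omega

def count_reduce (x : Int) (n : Int) : Int × Int := countA x n.toNat

-- ===== PORT B =====
-- bits of m, most significant first (bin(n)[2:] for positive n)
def natBits (m : Nat) : List Bool :=
  if m = 0 then [] else natBits (m / 2) ++ [m % 2 == 1]
decreasing_by omega

-- one loop body of Source B: doubling step, then the carry step if the bit is set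
def bStep (x : Int) (s : Int × Int) (b : Bool) : Int × Int :=
  let s1 : Int × Int :=
    if s.2 ≥ 5 then (2 * s.1 + 2, PySem.Int.mod (2 * s.2) 9) else (2 * s.1 + 1, 2 * s.2)
  if b then
    if s1.2 + x > 9 then (s1.1 + 2, PySem.Int.mod (s1.2 + x) 9) else (s1.1 + 1, s1.2 + x)
  else s1

def count_reduce_alt (x : Int) (n : Int) : Int × Int :=
  match natBits n.toNat with
  | [] => (0, x)
  | _ :: rest => rest.foldl (bStep x) (0, x)

-- ===== PRECONDITION & SPEC =====
-- Pre_ excludes n ≤ 0, on which Python A recurses forever (RecursionError).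
def Pre_count_reduce (x : Int) (n : Int) : Prop := 1 ≤ n
instance (x : Int) (n : Int) : Decidable (Pre_count_reduce x n) := by unfold Pre_count_reduce; infer_instance
def pvWitness_count_reduce : Int × Int := (7, 12)

def Spec_count_reduce (x : Int) (n : Int) (out : Int × Int) : Prop := out = count_reduce_alt x n
instance (x : Int) (n : Int) (out : Int × Int) : Decidable (Spec_count_reduce x n out) := by unfold Spec_count_reduce; infer_instance

-- ===== CLAIM (what is proved, stated in full; the proofs are below) =====
def Claim_equal_count_reduce : Prop := ∀ (x : Int) (n : Int), Dom_count_reduce x n → Pre_count_reduce x n → Spec_count_reduce x n (count_reduce x n)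

-- ===== LEMMAS AND PROOFS =====

lemma natBits_ne_nil (m : Nat) (hm : 1 ≤ m) : natBits m ≠ [] := by
  rw [natBits]
  simp [Nat.ne_of_gt hm]

lemma countA_eq_fold (x : Int) (m : Nat) (hm : 1 ≤ m) :
    countA x m = ((natBits m).tail).foldl (bStep x) (0, x) := by
  induction m using Nat.strong_induction_on with
  | _ m ih =>
    by_cases h1 : m ≤ 1
    · interval_cases m
      · rw [countA, natBits, natBits]
        simp
    · have h2 : 2 ≤ m := by omega
      have hhalf : 1 ≤ m / 2 := Nat.one_le_div_iff (by omega) |>.mpr (by omega)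
      have hrec := ih (m / 2) (by omega) hhalf
      have hb : natBits m = natBits (m / 2) ++ [m % 2 == 1] := by
        rw [natBits]; simp only [if_neg (by omega : ¬ m = 0)]
      have htail : (natBits m).tail = (natBits (m / 2)).tail ++ [m % 2 == 1] := by
        rw [hb]
        rcases hne : natBits (m / 2) with _ | ⟨a, l⟩
        · exact absurd hne (natBits_ne_nil _ hhalf)
        · simp
      rw [countA]
      simp only [h1, if_false]
      rw [htail, List.foldl_append, ← hrec]
      simp only [List.foldl_cons, List.foldl_nil, bStep]

theorem count_reduce_spec : Claim_equal_count_reduce := by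
  intro x n _ hpre
  unfold Spec_count_reduce count_reduce count_reduce_alt
  have hm : 1 ≤ n.toNat := by
    unfold Pre_count_reduce at hpre; omega
  rw [countA_eq_fold x n.toNat hm]
  rcases hne : natBits n.toNat with _ | ⟨a, l⟩
  · exact absurd hne (natBits_ne_nil _ hm)
  · simp
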